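-- pv_equiv track=rewrite | github.com/mpcodez/AI | manyints.py | dist100th
-- ===== SOURCE A (Python) =====
-- def dist100th(lst):
--     seen = set()
--     noted_values = []
--
--     for index, value in enumerate(lst):
--         if value not in seen:
--             seen.add(value)
--             if len(seen) % 100 == 0:
--                 noted_values.append(value)
--
--     return sum(noted_values)
-- ===== SOURCE B (Python) =====
-- def dist100th(lst):
--     # backward pass: overwriting map value -> first index (no membership test)
--     first = {}
--     for i, v in reversed(list(enumerate(lst))):
--         first[v] = i
--     # rank values by first appearance, then sum one element per 100-chunk
--     ranked = sorted(first, key=first.get)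
--     total = 0
--     while len(ranked) >= 100:
--         total += ranked[99]
--         ranked = ranked[100:]
--     return total
-- ===== Notes on version B (the rewrite author's own statement) =====
-- stated objective: alternative
-- what changed: Replaces A's single forward loop with its running seen-set, size-modulo test and append by a different algorithm: a backward overwriting pass builds a value-to-first-index map with no membership test, the values are then sorted by first index, and a chunked while loop sums the 99th element of each successive 100-block.
import Mathlib
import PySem

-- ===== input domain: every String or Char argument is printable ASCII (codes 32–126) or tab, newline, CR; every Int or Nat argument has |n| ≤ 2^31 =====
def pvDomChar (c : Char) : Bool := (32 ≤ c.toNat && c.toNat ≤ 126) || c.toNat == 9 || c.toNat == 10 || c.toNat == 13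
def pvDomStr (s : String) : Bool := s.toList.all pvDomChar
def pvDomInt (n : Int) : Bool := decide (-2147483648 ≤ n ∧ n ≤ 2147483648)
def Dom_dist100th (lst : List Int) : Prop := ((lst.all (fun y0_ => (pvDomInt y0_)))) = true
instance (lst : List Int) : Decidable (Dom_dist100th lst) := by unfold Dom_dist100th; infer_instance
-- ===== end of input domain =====

-- B replaces A's single stateful loop (running seen-set, size-modulo check, append) by a
-- backward overwriting first-index map, a sort of the values by first index, and a chunked
-- summation of the 99th element of each 100-block ("alternative": different algorithm, same result).

-- ===== PORT A =====
def dist100th (lst : List Int) : Int :=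
  (((PySem.List.enumerate lst 0).foldl
      (fun (st : PySem.Set Int × List Int) iv =>
        if PySem.Set.contains st.1 iv.2 then st
        else
          let seen' := PySem.Set.add st.1 iv.2
          if PySem.Int.mod (PySem.Set.len seen') 100 == 0 then (seen', st.2 ++ [iv.2])
          else (seen', st.2))
      (PySem.Set.empty, [])).2).sum

-- ===== PORT B =====
-- B's while loop `while len(ranked) >= 100: total += ranked[99]; ranked = ranked[100:]`
-- (ranked[99] is always in range under the guard, so the .getD 0 default is unreachable).
def chunkSumB (ranked : List Int) : Int :=
  if h : 100 ≤ ranked.length then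
    (PySem.List.pyGet? ranked 99).getD 0 + chunkSumB (PySem.List.slice ranked (some 100))
  else 0
termination_by ranked.length
decreasing_by
  rw [PySem.List.slice_from ranked (by norm_num)]
  simp only [List.length_drop]
  omega

-- `sorted(first, key=first.get)`: every key is in the dict, so `first.get k` is its value;
-- ported with getD (the default 0 is never consulted).
def dist100th_alt (lst : List Int) : Int :=
  let first := ((PySem.List.enumerate lst 0).reverse).foldl
      (fun (d : PySem.Dict Int Int) iv => d.insert iv.2 iv.1) PySem.Dict.empty
  let ranked := PySem.List.sorted (PySem.Dict.keys first) (fun k => PySem.Dict.getD first k 0)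
  chunkSumB ranked

-- ===== PRECONDITION & SPEC =====
def Spec_dist100th (lst : List Int) (out : Int) : Prop := out = dist100th_alt lst
instance (lst : List Int) (out : Int) : Decidable (Spec_dist100th lst out) := by unfold Spec_dist100th; infer_instance

-- ===== CLAIM =====
def Claim_equal_dist100th : Prop := ∀ (lst : List Int), Dom_dist100th lst → Spec_dist100th lst (dist100th lst)

-- ===== LEMMAS AND PROOFS =====

-- the new (not-yet-seen) values of l, in order, given the set already seen
def fnew (seen : PySem.Set Int) : List Int → List Int
  | [] => []
  | x :: xs =>
    if PySem.Set.contains seen x then fnew seen xs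
    else x :: fnew (PySem.Set.add seen x) xs

lemma update_eq_append_fnew (l : List Int) : ∀ (seen : PySem.Set Int),
    PySem.Set.update seen l = seen ++ fnew seen l := by
  induction l with
  | nil => intro seen; simp [fnew, PySem.Set.update]
  | cons x xs ih =>
    intro seen
    have hu : PySem.Set.update seen (x :: xs) = PySem.Set.update (PySem.Set.add seen x) xs := by
      simp [PySem.Set.update]
    by_cases h : x ∈ seen
    · have hx : PySem.Set.add seen x = seen := by simp [PySem.Set.add, h]
      rw [hu, hx, ih seen]
      simp [fnew, h]
    · have hx : PySem.Set.add seen x = seen ++ [x] := by simp [PySem.Set.add, h]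
      rw [hu, ih (PySem.Set.add seen x)]
      simp [fnew, h]

lemma fnew_empty (l : List Int) : fnew PySem.Set.empty l = PySem.List.dedup l := by
  have h := update_eq_append_fnew l PySem.Set.empty
  simp [PySem.Set.empty] at h
  rw [PySem.List.dedup_eq_ofList, PySem.Set.ofList_eq_foldl]
  simpa [PySem.Set.update] using h.symm

-- A's loop leaves, after the already-seen prefix, exactly the every-100th filter of the new values
lemma loop_inv (l : List Int) : ∀ (seen : PySem.Set Int) (noted : List Int) (s : Int),
    ((PySem.List.enumerate l s).foldl
      (fun (st : PySem.Set Int × List Int) iv =>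
        if PySem.Set.contains st.1 iv.2 then st
        else
          let seen' := PySem.Set.add st.1 iv.2
          if PySem.Int.mod (PySem.Set.len seen') 100 == 0 then (seen', st.2 ++ [iv.2])
          else (seen', st.2))
      (seen, noted)).2
    = noted ++ ((PySem.List.enumerate (fnew seen l) (PySem.Set.len seen + 1)).filter
        (fun p => PySem.Int.mod p.1 100 == 0)).map (fun p => p.2) := by
  induction l with
  | nil => intro seen noted s; simp [fnew, PySem.List.enumerate_nil]
  | cons x xs ih =>
    intro seen noted s
    rw [PySem.List.enumerate_cons]
    by_cases h : x ∈ seen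
    · have hc : PySem.Set.contains seen x = true := by simp [h]
      simp only [List.foldl_cons, hc, if_true]
      rw [ih seen noted (s + 1)]
      simp [fnew, h]
    · have hc : PySem.Set.contains seen x = false := by simp [h]
      have hadd : PySem.Set.add seen x = seen ++ [x] := by simp [PySem.Set.add, h]
      have hlen : PySem.Set.len (PySem.Set.add seen x) = PySem.Set.len seen + 1 := by
        simp [hadd, PySem.Set.len]
      simp only [List.foldl_cons, hc, Bool.false_eq_true, if_false]
      simp only [fnew, hc, Bool.false_eq_true, if_false]
      rw [PySem.List.enumerate_cons]
      by_cases hd : (100 : Int) ∣ ((seen.length : Int) + 1)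
      · have hm : (PySem.Int.mod (PySem.Set.len (PySem.Set.add seen x)) 100 == 0) = true := by
          rw [hlen]; simp [PySem.Set.len, hd]
        simp only [hm, if_true]
        rw [ih (PySem.Set.add seen x) (noted ++ [x]) (s + 1)]
        rw [hlen]
        simp [hd, List.append_assoc]
      · have hm : (PySem.Int.mod (PySem.Set.len (PySem.Set.add seen x)) 100 == 0) = false := by
          rw [hlen]; simp [PySem.Set.len, hd]
        simp only [hm, Bool.false_eq_true, if_false]
        rw [ih (PySem.Set.add seen x) noted (s + 1)]
        rw [hlen]
        simp [hd]

-- elements produced by fnew are new and from the list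
lemma mem_fnew : ∀ (l : List Int) (seen : PySem.Set Int) (v : Int),
    v ∈ fnew seen l → v ∈ l ∧ v ∉ seen := by
  intro l
  induction l with
  | nil => intro seen v h; simp [fnew] at h
  | cons x xs ih =>
    intro seen v h
    by_cases hx : x ∈ seen
    · have hc : PySem.Set.contains seen x = true := by simp [hx]
      simp only [fnew, hc, if_true] at h
      obtain ⟨h1, h2⟩ := ih seen v h
      exact ⟨List.mem_cons_of_mem _ h1, h2⟩
    · have hc : PySem.Set.contains seen x = false := by simp [hx]
      simp only [fnew, hc, Bool.false_eq_true, if_false, List.mem_cons] at h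
      rcases h with h | h
      · exact ⟨by simp [h], by simpa [h] using hx⟩
      · obtain ⟨h1, h2⟩ := ih _ v h
        have hadd : PySem.Set.add seen x = seen ++ [x] := by simp [PySem.Set.add, hx]
        refine ⟨List.mem_cons_of_mem _ h1, fun hv => h2 ?_⟩
        rw [hadd]
        simp [hv]

-- fnew lists values in strictly increasing order of first occurrence
lemma pairwise_fnew : ∀ (l : List Int) (seen : PySem.Set Int),
    List.Pairwise (fun a b => ((List.idxOf a l : Nat) : Int) < ((List.idxOf b l : Nat) : Int)) (fnew seen l) := by
  intro l
  induction l with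
  | nil => intro seen; simp [fnew]
  | cons x xs ih =>
    intro seen
    by_cases hx : x ∈ seen
    · have hc : PySem.Set.contains seen x = true := by simp [hx]
      simp only [fnew, hc, if_true]
      refine (ih seen).imp_of_mem ?_
      intro a b ha hb hab
      have hna := (mem_fnew xs seen a ha).2
      have hnb := (mem_fnew xs seen b hb).2
      have hax : a ≠ x := fun h => hna (h ▸ hx)
      have hbx : b ≠ x := fun h => hnb (h ▸ hx)
      rw [List.idxOf_cons_ne _ (Ne.symm hax), List.idxOf_cons_ne _ (Ne.symm hbx)]
      push_cast
      omega
    · have hc : PySem.Set.contains seen x = false := by simp [hx]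
      have hadd : PySem.Set.add seen x = seen ++ [x] := by simp [PySem.Set.add, hx]
      simp only [fnew, hc, Bool.false_eq_true, if_false]
      refine List.pairwise_cons.mpr ⟨?_, ?_⟩
      · intro b hb
        have hnb := (mem_fnew xs _ b hb).2
        have hbx : b ≠ x := by
          intro h; apply hnb; rw [hadd, h]; simp
        rw [List.idxOf_cons_self, List.idxOf_cons_ne _ (Ne.symm hbx)]
        push_cast
        omega
      · refine (ih (PySem.Set.add seen x)).imp_of_mem ?_
        intro a b ha hb hab
        have hna := (mem_fnew xs _ a ha).2
        have hnb := (mem_fnew xs _ b hb).2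
        have hax : a ≠ x := by intro h; apply hna; rw [hadd, h]; simp
        have hbx : b ≠ x := by intro h; apply hnb; rw [hadd, h]; simp
        rw [List.idxOf_cons_ne _ (Ne.symm hax), List.idxOf_cons_ne _ (Ne.symm hbx)]
        push_cast
        omega

-- the first-index dict built by B's backward pass, peeled from the front
def bldr (s : Int) (xs : List Int) : PySem.Dict Int Int :=
  List.foldr (fun (iv : Int × Int) d => d.insert iv.2 iv.1) PySem.Dict.empty (PySem.List.enumerate xs s)

lemma bldr_nil (s : Int) : bldr s [] = PySem.Dict.empty := by
  simp [bldr, PySem.List.enumerate_nil]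

lemma bldr_cons (s x : Int) (xs : List Int) : bldr s (x :: xs) = (bldr (s + 1) xs).insert x s := by
  simp [bldr, PySem.List.enumerate_cons]

lemma first_eq_bldr (lst : List Int) :
    ((PySem.List.enumerate lst 0).reverse).foldl
      (fun (d : PySem.Dict Int Int) iv => d.insert iv.2 iv.1) PySem.Dict.empty = bldr 0 lst := by
  rw [List.foldl_reverse]; rfl

lemma keys_insert (d : PySem.Dict Int Int) (k v : Int) :
    (d.insert k v).keys = if k ∈ d.keys then d.keys else d.keys ++ [k] := by
  by_cases h : d.contains k = true
  · have hk : k ∈ d.keys := by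
      simp only [PySem.Dict.contains, List.any_eq_true, beq_iff_eq] at h
      obtain ⟨p, hp, hpk⟩ := h
      exact hpk ▸ List.mem_map_of_mem hp
    rw [if_pos hk]
    simp only [PySem.Dict.insert, h, if_true, PySem.Dict.keys]
    rw [List.map_map]
    apply List.map_congr_left
    intro p _
    by_cases hp : (p.1 == k) = true
    · simp only [Function.comp_apply, hp, if_true]
      exact (beq_iff_eq.mp hp).symm
    · simp [Function.comp, hp]
  · have hk : k ∉ d.keys := by
      simp only [PySem.Dict.contains, List.any_eq_true, beq_iff_eq] at h
      intro hm
      obtain ⟨p, hp, hpk⟩ := List.mem_map.mp hm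
      exact h ⟨p, hp, hpk⟩
    rw [if_neg hk]
    simp [PySem.Dict.insert, h, PySem.Dict.keys]

lemma mem_keys_bldr : ∀ (xs : List Int) (s v : Int), v ∈ (bldr s xs).keys ↔ v ∈ xs := by
  intro xs
  induction xs with
  | nil => intro s v; simp [bldr_nil, PySem.Dict.empty, PySem.Dict.keys]
  | cons x xs ih =>
    intro s v
    rw [bldr_cons, keys_insert]
    by_cases h : x ∈ (bldr (s + 1) xs).keys
    · have hx : x ∈ xs := (ih (s + 1) x).mp h
      simp only [h, if_true, ih, List.mem_cons]
      constructor
      · exact Or.inr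
      · rintro (rfl | hv)
        · exact hx
        · exact hv
    · simp [h, ih, List.mem_append, or_comm]

lemma nodup_keys_bldr : ∀ (xs : List Int) (s : Int), (bldr s xs).keys.Nodup := by
  intro xs
  induction xs with
  | nil => intro s; simp [bldr_nil, PySem.Dict.empty, PySem.Dict.keys]
  | cons x xs ih =>
    intro s
    rw [bldr_cons, keys_insert]
    by_cases h : x ∈ (bldr (s + 1) xs).keys
    · simpa [h] using ih (s + 1)
    · simp only [h, if_false]
      rw [List.nodup_append]
      refine ⟨ih (s + 1), List.nodup_singleton x, ?_⟩
      intro a ha b hb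
      rw [List.mem_singleton] at hb
      subst hb
      exact fun e => h (e ▸ ha)

lemma getD_bldr : ∀ (xs : List Int) (s v : Int), v ∈ xs →
    PySem.Dict.getD (bldr s xs) v 0 = s + ((List.idxOf v xs : Nat) : Int) := by
  intro xs
  induction xs with
  | nil => intro s v h; simp at h
  | cons x xs ih =>
    intro s v hv
    rw [bldr_cons, PySem.Dict.getD_insert]
    by_cases h : v = x
    · simp [h, List.idxOf_cons_self]
    · have hvx : v ∈ xs := by
        rcases List.mem_cons.mp hv with h' | h'
        · exact absurd h' h
        · exact h'
      rw [if_neg h, ih (s + 1) v hvx, List.idxOf_cons_ne _ (Ne.symm h)]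
      push_cast
      omega

-- sorting the dict's keys by first index yields exactly the first-appearance dedup order
lemma sorted_keys (lst : List Int) :
    PySem.List.sorted ((bldr 0 lst).keys) (fun k => PySem.Dict.getD (bldr 0 lst) k 0)
      = PySem.List.dedup lst := by
  apply PySem.List.sorted_eq_of_perm_of_pairwise_lt
  · rw [List.perm_ext_iff_of_nodup]
    · intro a
      rw [PySem.List.dedup_eq_ofList, PySem.Set.mem_ofList, mem_keys_bldr]
    · rw [PySem.List.dedup_eq_ofList]; exact PySem.Set.nodup_ofList lst
    · exact nodup_keys_bldr lst 0
  · have hp := pairwise_fnew lst PySem.Set.empty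
    rw [fnew_empty] at hp
    refine hp.imp_of_mem ?_
    intro a b ha hb hab
    have ha' : a ∈ lst := by
      rw [PySem.List.dedup_eq_ofList, PySem.Set.mem_ofList] at ha; exact ha
    have hb' : b ∈ lst := by
      rw [PySem.List.dedup_eq_ofList, PySem.Set.mem_ofList] at hb; exact hb
    rw [getD_bldr lst 0 a ha', getD_bldr lst 0 b hb']
    omega

lemma pymod100 (n : Int) : PySem.Int.mod n 100 = n % 100 := by
  show Int.fmod n 100 = n % 100
  rw [Int.fmod_eq_emod_of_nonneg _ (by norm_num)]

-- the A-side selection sum, as a function of the start index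
def sumF (xs : List Int) (s : Int) : Int :=
  (((PySem.List.enumerate xs s).filter (fun p => PySem.Int.mod p.1 100 == 0)).map (fun p => p.2)).sum

lemma sumF_nil (s : Int) : sumF [] s = 0 := by
  simp [sumF, PySem.List.enumerate_nil]

lemma sumF_cons (x : Int) (xs : List Int) (s : Int) :
    sumF (x :: xs) s = (if PySem.Int.mod s 100 == 0 then x else 0) + sumF xs (s + 1) := by
  unfold sumF
  rw [PySem.List.enumerate_cons]
  by_cases hd : (100 : Int) ∣ s
  · have h : (PySem.Int.mod s 100 == 0) = true := by
      rw [pymod100]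
      exact beq_iff_eq.mpr (Int.emod_eq_zero_of_dvd hd)
    simp [hd]
  · have h : (PySem.Int.mod s 100 == 0) = false := by
      rw [beq_eq_false_iff_ne, pymod100]
      exact fun e => hd (Int.dvd_of_emod_eq_zero e)
    simp [hd]

lemma sumF_append : ∀ (a b : List Int) (s : Int),
    sumF (a ++ b) s = sumF a s + sumF b (s + a.length) := by
  intro a
  induction a with
  | nil => intro b s; simp [sumF_nil]
  | cons x xs ih =>
    intro b s
    rw [List.cons_append, sumF_cons, sumF_cons, ih, List.length_cons]
    have hc : s + 1 + ((xs.length : Nat) : Int) = s + ((((xs.length : Nat) + 1 : Nat)) : Int) := by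
      push_cast; ring
    rw [hc, add_assoc]

lemma sumF_shift : ∀ (ys : List Int) (s : Int), sumF ys (s + 100) = sumF ys s := by
  intro ys
  induction ys with
  | nil => intro s; simp [sumF_nil]
  | cons y ys ih =>
    intro s
    rw [sumF_cons, sumF_cons]
    have hm : PySem.Int.mod (s + 100) 100 = PySem.Int.mod s 100 := by
      rw [pymod100, pymod100]; omega
    have : s + 100 + 1 = s + 1 + 100 := by ring
    rw [hm, this, ih]

lemma sumF_small : ∀ (ys : List Int) (s : Int), 1 ≤ s → s + (ys.length : Int) ≤ 100 → sumF ys s = 0 := by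
  intro ys
  induction ys with
  | nil => intro s _ _; simp [sumF_nil]
  | cons y ys ih =>
    intro s h1 h2
    simp only [List.length_cons] at h2
    have hm : (PySem.Int.mod s 100 == 0) = false := by
      rw [beq_eq_false_iff_ne]
      rw [pymod100]
      omega
    rw [sumF_cons, hm]
    simp only [Bool.false_eq_true, if_false, zero_add]
    exact ih (s + 1) (by omega) (by push_cast at h2 ⊢; omega)

lemma sumF_block : ∀ (ys : List Int) (s : Int), 1 ≤ s → s ≤ 100 → s + (ys.length : Int) = 101 →
    sumF ys s = (ys[(100 - s).toNat]?).getD 0 := by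
  intro ys
  induction ys with
  | nil => intro s h1 h2 h3; simp at h3; omega
  | cons y ys ih =>
    intro s h1 h2 h3
    simp only [List.length_cons] at h3
    by_cases hs : s = 100
    · have hlen : ys.length = 0 := by push_cast at h3; omega
      have hyse : ys = [] := List.length_eq_zero_iff.mp hlen
      subst hyse hs
      rw [sumF_cons, sumF_nil]
      have hm : (PySem.Int.mod 100 100 == 0) = true := by decide
      rw [hm]
      simp
    · have hm : (PySem.Int.mod s 100 == 0) = false := by
        rw [beq_eq_false_iff_ne, pymod100]
        omega
      rw [sumF_cons, hm]
      simp only [Bool.false_eq_true, if_false, zero_add]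
      rw [ih (s + 1) (by omega) (by omega) (by push_cast at h3 ⊢; omega)]
      have hn : (100 - s).toNat = (100 - (s + 1)).toNat + 1 := by omega
      rw [hn]
      simp

lemma sumF_eq_chunkSumB : ∀ (xs : List Int), sumF xs 1 = chunkSumB xs := by
  intro xs
  induction xs using chunkSumB.induct with
  | case1 xs h ih =>
    rw [chunkSumB, dif_pos h]
    rw [PySem.List.slice_from xs (by norm_num)] at ih ⊢
    rw [show ((100 : Int)).toNat = 100 from rfl] at ih ⊢
    conv_lhs => rw [← List.take_append_drop 100 xs]
    rw [sumF_append]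
    have hlen : (xs.take 100).length = 100 := by simp; omega
    rw [hlen]
    have hshift : sumF (List.drop 100 xs) (1 + ((100 : Nat) : Int)) = sumF (List.drop 100 xs) 1 := by
      have hs := sumF_shift (List.drop 100 xs) 1
      norm_num at hs ⊢
      exact hs
    rw [hshift, ih]
    congr 1
    rw [sumF_block (xs.take 100) 1 (by norm_num) (by norm_num) (by rw [hlen]; norm_num), show ((100 : Int) - 1).toNat = 99 from rfl]
    have h99 : (xs.take 100)[99]? = xs[99]? := by
      rw [List.getElem?_take_of_lt (by norm_num)]
    rw [h99]
    have h2 : (99 : Int) = ((99 : Nat) : Int) := by norm_num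
    rw [h2, PySem.List.pyGet?_natCast]
  | case2 xs h =>
    rw [chunkSumB, dif_neg h]
    exact sumF_small xs 1 (by norm_num) (by omega)

-- ===== VERDICT =====
theorem dist100th_spec : Claim_equal_dist100th := by
  intro lst _
  unfold Spec_dist100th dist100th dist100th_alt
  rw [loop_inv lst PySem.Set.empty [] 0, fnew_empty]
  rw [first_eq_bldr]
  dsimp only
  rw [sorted_keys]
  have hlen0 : PySem.Set.len (PySem.Set.empty (α := Int)) = 0 := by
    simp [PySem.Set.empty, PySem.Set.len]
  rw [hlen0]
  simp only [List.nil_append, zero_add]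
  exact sumF_eq_chunkSumB (PySem.List.dedup lst)
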